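-- pv_equiv track=rewrite | github.com/lodino/gopher-demo | gopher-demo-dev/main.py | join_predicates_with_linebreak
-- ===== SOURCE A (Python) =====
-- def join_predicates_with_linebreak(predicates, break_len=60):
--     expl_txt = ''
--     line_char_cnt = 0
--     for e_idx, e in enumerate(predicates):
--         if line_char_cnt != 0:
--             if line_char_cnt + len(e) + 3 > break_len:
--                 expl_txt += ('\n' + e + ' ∧ ')
--                 line_char_cnt = len(e) + 3
--             else:
--                 expl_txt += (e + ' ∧ ')
--                 line_char_cnt += (len(e) + 3)
--         else:
--             expl_txt += (e + ' ∧ ')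
--             line_char_cnt += (len(e) + 3)
--         if e_idx == len(predicates) - 1:
--             expl_txt = expl_txt[:-3]
--     return expl_txt
-- ===== SOURCE B (Python) =====
-- def join_predicates_with_linebreak(predicates, break_len=60):
--     lines = []
--     cur = []
--     cur_len = 0
--     for e in predicates:
--         if cur and cur_len + len(e) + 3 > break_len:
--             lines.append(cur)
--             cur = [e]
--             cur_len = len(e) + 3
--         else:
--             cur.append(e)
--             cur_len += len(e) + 3
--     lines.append(cur)
--     return ' \u2227 \n'.join(' \u2227 '.join(line) for line in lines)
-- ===== Notes on version B (the rewrite author's own statement) =====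
-- stated objective: simpler
-- what changed: B replaces A's single loop that accumulates one output string (appending ' ∧ ' after every predicate and slicing the last 3 characters off at the final index) with a two-phase decomposition: first group predicates into lines by the same greedy length rule, then render with ' ∧ '.join per line and ' ∧ \n'.join across lines, so no trailing-separator slicing is needed.
import Mathlib
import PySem

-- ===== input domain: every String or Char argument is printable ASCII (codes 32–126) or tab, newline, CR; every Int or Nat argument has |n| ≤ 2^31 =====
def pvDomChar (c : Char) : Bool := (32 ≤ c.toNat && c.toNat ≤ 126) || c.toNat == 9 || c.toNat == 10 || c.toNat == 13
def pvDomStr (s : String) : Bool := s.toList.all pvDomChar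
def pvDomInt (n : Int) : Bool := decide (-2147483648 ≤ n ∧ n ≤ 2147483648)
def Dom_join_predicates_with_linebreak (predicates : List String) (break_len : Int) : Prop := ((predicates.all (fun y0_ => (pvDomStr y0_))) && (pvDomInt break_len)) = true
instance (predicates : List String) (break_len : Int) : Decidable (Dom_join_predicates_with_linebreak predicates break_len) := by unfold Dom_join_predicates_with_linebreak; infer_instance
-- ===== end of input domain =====

-- B rewrites A's single accumulating loop as group-into-lines then join (' ∧ '.join per line, ' ∧ \n'.join across lines); same result, no slicing off a trailing separator.

-- ===== PORT A =====
-- loop body of A, without the last-iteration strip (the two non-break branches are kept separate, as in the source)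
def pvStepA' (break_len : Int) (st : List Char × Int) (e : String) : List Char × Int :=
  if st.2 ≠ 0 then
    if st.2 + PySem.Str.len e + 3 > break_len then
      (st.1 ++ ('\n' :: (e.toList ++ " ∧ ".toList)), PySem.Str.len e + 3)
    else
      (st.1 ++ (e.toList ++ " ∧ ".toList), st.2 + (PySem.Str.len e + 3))
  else
    (st.1 ++ (e.toList ++ " ∧ ".toList), st.2 + (PySem.Str.len e + 3))

-- full loop body: at the last index, expl_txt = expl_txt[:-3]
def pvStepA (break_len N : Int) (st : List Char × Int) (p : Int × String) : List Char × Int :=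
  let st1 := pvStepA' break_len st p.2
  if p.1 = N - 1 then (PySem.List.slice st1.1 none (some (-3)), st1.2) else st1

def join_predicates_with_linebreak (predicates : List String) (break_len : Int) : String :=
  String.ofList ((PySem.List.enumerate predicates 0).foldl
    (pvStepA break_len (predicates.length : Int)) ([], 0)).1

-- ===== PORT B =====
-- loop body of B: start a new line on overflow, else extend the current line
def pvStepB (break_len : Int) (st : List (List String) × List String × Int) (e : String) :
    List (List String) × List String × Int :=
  if st.2.1 ≠ [] ∧ st.2.2 + PySem.Str.len e + 3 > break_len then
    (st.1 ++ [st.2.1], [e], PySem.Str.len e + 3)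
  else
    (st.1, st.2.1 ++ [e], st.2.2 + (PySem.Str.len e + 3))

-- ' ∧ '.join(line)
def pvRenderLine (line : List String) : List Char :=
  PySem.Chars.join " ∧ ".toList (line.map String.toList)

def join_predicates_with_linebreak_alt (predicates : List String) (break_len : Int) : String :=
  let st := predicates.foldl (pvStepB break_len) ([], [], 0)
  String.ofList (PySem.Chars.join " ∧ \n".toList ((st.1 ++ [st.2.1]).map pvRenderLine))

-- ===== PRECONDITION & SPEC =====
def Spec_join_predicates_with_linebreak (predicates : List String) (break_len : Int) (out : String) : Prop := out = join_predicates_with_linebreak_alt predicates break_len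
instance (predicates : List String) (break_len : Int) (out : String) : Decidable (Spec_join_predicates_with_linebreak predicates break_len out) := by unfold Spec_join_predicates_with_linebreak; infer_instance

-- ===== CLAIM (what is proved, stated in full; the proofs are below) =====
def Claim_equal_join_predicates_with_linebreak : Prop := ∀ (predicates : List String) (break_len : Int), Dom_join_predicates_with_linebreak predicates break_len → Spec_join_predicates_with_linebreak predicates break_len (join_predicates_with_linebreak predicates break_len)

-- ===== LEMMAS AND PROOFS =====

-- intercalate facts
theorem pv_inter_singleton (s y : List Char) : s.intercalate [y] = y := by
  simp [List.intercalate]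

theorem pv_inter_cons (s a b : List Char) (t : List (List Char)) :
    s.intercalate (a :: b :: t) = a ++ s ++ s.intercalate (b :: t) := by
  simp [List.intercalate, List.intersperse]

theorem pv_inter_cons_ne (s a : List Char) (t : List (List Char)) (h : t ≠ []) :
    s.intercalate (a :: t) = a ++ s ++ s.intercalate t := by
  cases t with
  | nil => exact absurd rfl h
  | cons b t => exact pv_inter_cons s a b t

theorem pv_inter_append_singleton (s : List Char) :
    ∀ (xs : List (List Char)), xs ≠ [] → ∀ y, s.intercalate (xs ++ [y]) = s.intercalate xs ++ s ++ y := by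
  intro xs
  induction xs with
  | nil => intro h; exact absurd rfl h
  | cons a t ih =>
    intro _ y
    cases t with
    | nil => simp [pv_inter_cons, pv_inter_singleton]
    | cons b t' =>
      rw [List.cons_append, pv_inter_cons_ne s a _ (by simp), pv_inter_cons s a b t',
        ih (by simp) y]
      simp

theorem pv_inter_last (s : List Char) :
    ∀ (L : List (List Char)) (y z : List Char),
      s.intercalate (L ++ [y ++ z]) = s.intercalate (L ++ [y]) ++ z := by
  intro L
  induction L with
  | nil => intro y z; simp [pv_inter_singleton]
  | cons a t ih =>
    intro y z
    rw [List.cons_append, List.cons_append,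
      pv_inter_cons_ne s a _ (by simp), pv_inter_cons_ne s a _ (by simp), ih y z]
    simp

-- rendered prefix of B's grouped state, in the form A's loop maintains
def pvR (lines : List (List String)) (cur : List String) : List Char :=
  PySem.Chars.join " ∧ \n".toList ((lines ++ [cur]).map pvRenderLine)

-- coupling invariant between A's (txt, cnt) and B's (lines, cur, cur_len), once the loop has run at least once
def pvInvR (a : List Char × Int) (b : List (List String) × List String × Int) : Prop :=
  a.2 = b.2.2 ∧ b.2.1 ≠ [] ∧ 0 < b.2.2 ∧ a.1 = pvR b.1 b.2.1 ++ " ∧ ".toList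

theorem pv_len_nonneg (e : String) : 0 ≤ PySem.Str.len e := by
  simp [PySem.Str.len]

theorem pv_sepNL : " ∧ \n".toList = " ∧ ".toList ++ ['\n'] := by decide

theorem pv_render_singleton (e : String) : pvRenderLine [e] = e.toList := by
  simp [pvRenderLine, PySem.Chars.join, pv_inter_singleton]

theorem pvR_newline (lines : List (List String)) (cur : List String) (e : String) :
    pvR (lines ++ [cur]) [e] = pvR lines cur ++ " ∧ ".toList ++ ('\n' :: e.toList) := by
  unfold pvR
  simp only [PySem.Chars.join, List.append_assoc, List.map_append]
  rw [show List.map pvRenderLine [cur] ++ List.map pvRenderLine [[e]]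
      = List.map pvRenderLine [cur] ++ [pvRenderLine [e]] from by simp,
    ← List.append_assoc, pv_inter_append_singleton _ _ (by simp)]
  simp [pv_render_singleton, pv_sepNL]

theorem pvR_extend (lines : List (List String)) (cur : List String) (hc : cur ≠ []) (e : String) :
    pvR lines (cur ++ [e]) = pvR lines cur ++ " ∧ ".toList ++ e.toList := by
  unfold pvR
  have hrl : pvRenderLine (cur ++ [e]) = pvRenderLine cur ++ (" ∧ ".toList ++ e.toList) := by
    unfold pvRenderLine
    simp only [PySem.Chars.join, List.map_append, List.map_singleton]
    rw [pv_inter_append_singleton _ _ (by simpa using hc)]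
    simp
  simp only [PySem.Chars.join, List.map_append, List.map_singleton]
  rw [hrl, pv_inter_last]
  simp

theorem pv_step_pres (br : Int) (a : List Char × Int) (b : List (List String) × List String × Int)
    (h : pvInvR a b) (e : String) : pvInvR (pvStepA' br a e) (pvStepB br b e) := by
  obtain ⟨h1, h2, h3, h4⟩ := h
  have hlen := pv_len_nonneg e
  by_cases hov : b.2.2 + PySem.Str.len e + 3 > br
  · -- break: new line
    have hA : pvStepA' br a e =
        (a.1 ++ ('\n' :: (e.toList ++ " ∧ ".toList)), PySem.Str.len e + 3) := by
      unfold pvStepA'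
      rw [if_pos (by omega), if_pos (by omega : a.2 + PySem.Str.len e + 3 > br)]
    have hB : pvStepB br b e = (b.1 ++ [b.2.1], [e], PySem.Str.len e + 3) := by
      unfold pvStepB
      rw [if_pos ⟨h2, hov⟩]
    refine ⟨by rw [hA, hB], by rw [hB]; simp, by rw [hB]; dsimp; omega, ?_⟩
    rw [hA, hB]
    show a.1 ++ ('\n' :: (e.toList ++ " ∧ ".toList)) = pvR (b.1 ++ [b.2.1]) [e] ++ " ∧ ".toList
    rw [pvR_newline, h4]
    simp
  · -- extend the current line
    have hA : pvStepA' br a e =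
        (a.1 ++ (e.toList ++ " ∧ ".toList), a.2 + (PySem.Str.len e + 3)) := by
      unfold pvStepA'
      rw [if_pos (by omega), if_neg (by omega)]
    have hB : pvStepB br b e = (b.1, b.2.1 ++ [e], b.2.2 + (PySem.Str.len e + 3)) := by
      unfold pvStepB
      rw [if_neg (by tauto)]
    refine ⟨by rw [hA, hB]; dsimp; omega, by rw [hB]; simp, by rw [hB]; dsimp; omega, ?_⟩
    rw [hA, hB]
    show a.1 ++ (e.toList ++ " ∧ ".toList) = pvR b.1 (b.2.1 ++ [e]) ++ " ∧ ".toList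
    rw [pvR_extend _ _ h2, h4]
    simp

theorem pv_fold_pres (br : Int) :
    ∀ (l : List String) (a : List Char × Int) (b : List (List String) × List String × Int),
      pvInvR a b → pvInvR (l.foldl (pvStepA' br) a) (l.foldl (pvStepB br) b) := by
  intro l
  induction l with
  | nil => intro a b h; exact h
  | cons e l ih =>
    intro a b h
    exact ih _ _ (pv_step_pres br a b h e)

theorem pv_strip (br : Int) :
    ∀ (l : List String), l ≠ [] → ∀ (s N : Int), s + l.length = N → ∀ (a : List Char × Int),
      (PySem.List.enumerate l s).foldl (pvStepA br N) a =
        (PySem.List.slice ((l.foldl (pvStepA' br) a).1) none (some (-3)),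
          (l.foldl (pvStepA' br) a).2) := by
  intro l
  induction l with
  | nil => intro h; exact absurd rfl h
  | cons e l ih =>
    intro _ s N hN a
    rw [PySem.List.enumerate_cons]
    cases l with
    | nil =>
      simp only [PySem.List.enumerate_nil, List.foldl_cons, List.foldl_nil]
      unfold pvStepA
      have : s = N - 1 := by simp at hN; omega
      rw [if_pos this]
    | cons f l' =>
      have hs : s ≠ N - 1 := by
        simp only [List.length_cons] at hN
        push_cast at hN
        omega
      simp only [List.foldl_cons]
      have hstep : pvStepA br N a (s, e) = pvStepA' br a e := by
        unfold pvStepA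
        rw [if_neg hs]
      rw [hstep]
      have := ih (by simp) (s + 1) N (by simp only [List.length_cons] at hN ⊢; push_cast at hN ⊢; omega) (pvStepA' br a e)
      simpa using this

theorem pv_sep_len : (" ∧ ".toList).length = 3 := by decide

-- ===== VERDICT (by name: the statement is the Claim_ definition above) =====
theorem join_predicates_with_linebreak_spec : Claim_equal_join_predicates_with_linebreak := by
  intro predicates break_len _
  show join_predicates_with_linebreak predicates break_len
      = join_predicates_with_linebreak_alt predicates break_len
  cases predicates with
  | nil =>
    rfl
  | cons p rest =>
    unfold join_predicates_with_linebreak join_predicates_with_linebreak_alt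
    rw [pv_strip break_len (p :: rest) (by simp) 0 ((p :: rest).length : Int) (by simp) ([], 0)]
    have hinit : pvInvR (pvStepA' break_len ([], 0) p) (pvStepB break_len ([], [], 0) p) := by
      have hlen := pv_len_nonneg p
      have hA : pvStepA' break_len ([], 0) p
          = (p.toList ++ " ∧ ".toList, 0 + (PySem.Str.len p + 3)) := by
        unfold pvStepA'
        rw [if_neg (by simp)]
        simp
      have hB : pvStepB break_len (([], [], 0) : List (List String) × List String × Int) p
          = ([], [p], 0 + (PySem.Str.len p + 3)) := by
        unfold pvStepB
        rw [if_neg (by simp)]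
        simp
      refine ⟨by rw [hA, hB], by rw [hB]; simp, by rw [hB]; dsimp; omega, ?_⟩
      rw [hA, hB]
      show p.toList ++ " ∧ ".toList = pvR [] [p] ++ " ∧ ".toList
      simp [pvR, pv_render_singleton, pv_inter_singleton, PySem.Chars.join]
    have hfold := pv_fold_pres break_len rest _ _ hinit
    simp only [List.foldl_cons]
    obtain ⟨-, -, -, h4⟩ := hfold
    rw [h4]
    rw [PySem.List.slice_to_neg_ofNat _ 3 (by omega)]
    rw [List.length_append, pv_sep_len]
    rw [Nat.add_sub_cancel, List.take_left]
    rfl
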